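-- pv_equiv track=rewrite | github.com/4J-company/conan-center-index | recipes/openusd/all/conanfile.py | _apply_graphviz_rename_to_components
-- ===== SOURCE A (Python) =====
-- def _apply_graphviz_rename_to_components(raw_components, rename):
--     """Merge lists when multiple raw labels collapse to the same renamed key."""
--     merged = {}
--     for k, deps in raw_components.items():
--         nk = rename[k]
--         ndeps = [rename[d] for d in deps]
--         merged.setdefault(nk, []).extend(ndeps)
--     for nk in merged:
--         seen = set()
--         deduped = []
--         for d in merged[nk]:
--             if d not in seen:
--                 seen.add(d)
--                 deduped.append(d)
--         merged[nk] = deduped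
--     return merged
-- ===== SOURCE B (Python) =====
-- def _dedup(xs):
--     """Keep first occurrences by repeatedly taking the head and filtering it out of the rest."""
--     out = []
--     while xs:
--         head = xs[0]
--         out.append(head)
--         xs = [x for x in xs[1:] if x != head]
--     return out
--
--
-- def _apply_graphviz_rename_to_components(raw_components, rename):
--     """Group-by-rescan: rename everything once, then build each output entry by a full scan."""
--     pairs = [(rename[k], [rename[d] for d in deps]) for k, deps in raw_components.items()]
--     return {
--         nk: _dedup([d for nk2, nds in pairs if nk2 == nk for d in nds])
--         for nk in _dedup([nk for nk, _ in pairs])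
--     }
-- ===== Notes on version B (the rewrite author's own statement) =====
-- stated objective: alternative
-- what changed: B replaces A's mutating dict-accumulator with setdefault/extend plus a seen-set dedup pass by a declarative group-by-rescan: it renames everything once into a pairs list, computes the distinct output keys with a head-and-filter dedup (no set, no membership test against an accumulator), and builds each output list by rescanning pairs for that key and deduping it the same filter-out way.
import Mathlib
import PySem

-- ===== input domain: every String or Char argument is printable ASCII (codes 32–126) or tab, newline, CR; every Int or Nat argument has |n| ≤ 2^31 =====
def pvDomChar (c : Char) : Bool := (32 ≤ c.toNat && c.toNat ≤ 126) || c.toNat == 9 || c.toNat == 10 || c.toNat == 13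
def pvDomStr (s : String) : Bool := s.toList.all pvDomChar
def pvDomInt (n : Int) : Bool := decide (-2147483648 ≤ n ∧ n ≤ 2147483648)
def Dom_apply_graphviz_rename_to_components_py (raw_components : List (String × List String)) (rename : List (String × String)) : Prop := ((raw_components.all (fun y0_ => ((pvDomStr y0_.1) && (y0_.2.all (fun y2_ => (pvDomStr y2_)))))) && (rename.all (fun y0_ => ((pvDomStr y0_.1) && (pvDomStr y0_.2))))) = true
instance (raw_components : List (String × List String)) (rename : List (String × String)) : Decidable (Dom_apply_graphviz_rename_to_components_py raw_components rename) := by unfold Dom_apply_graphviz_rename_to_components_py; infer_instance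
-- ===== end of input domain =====

-- B replaces A's mutating dict-accumulator + seen-set dedup pass by a declarative group-by-rescan
-- with a head-and-filter dedup (objective: alternative; not faster).


-- ===== PORT A =====
-- rename[k]: Python dict subscript; the KeyError case (k not a key of rename) is excluded by Pre_ below.
def pvRn (rename : List (String × String)) (k : String) : String :=
  (PySem.Dict.ofList rename).getD k ""

def apply_graphviz_rename_to_components_py (raw_components : List (String × List String)) (rename : List (String × String)) : List (String × List String) :=
  -- first loop: merged.setdefault(nk, []).extend(ndeps)  ==  merged[nk] = merged.get(nk, []) + ndeps
  let merged : PySem.Dict String (List String) :=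
    raw_components.foldl
      (fun m p =>
        let nk := pvRn rename p.1
        let ndeps := p.2.map (fun d => pvRn rename d)
        m.modify nk [] (fun v => v ++ ndeps))
      PySem.Dict.empty
  -- second loop: for nk in merged: merged[nk] = deduped (seen-set dedup, first occurrences)
  merged.items.map (fun q =>
    (q.1, (q.2.foldl
      (fun (st : PySem.Set String × List String) d =>
        if PySem.Set.contains st.1 d then st else (PySem.Set.add st.1 d, st.2 ++ [d]))
      (PySem.Set.empty, [])).2))

-- ===== PORT B =====
-- _dedup: while xs: keep the head, filter it out of the tail (the while loop over a shrinking
-- list is ported as the corresponding recursion on the list; out.append(head) = head :: recurse)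
def pvDedupB (xs : List String) : List String :=
  match xs with
  | [] => []
  | x :: t => x :: pvDedupB (t.filter (fun y => !(y == x)))
termination_by xs.length
decreasing_by
  simpa using Nat.lt_succ_of_le (le_trans (List.length_filter_le _ _) (by simp))

def apply_graphviz_rename_to_components_py_alt (raw_components : List (String × List String)) (rename : List (String × String)) : List (String × List String) :=
  -- pairs = [(rename[k], [rename[d] for d in deps]) for k, deps in raw_components.items()]
  let pairs := raw_components.map (fun p => (pvRn rename p.1, p.2.map (fun d => pvRn rename d)))
  -- {nk: _dedup([d for nk2, nds in pairs if nk2 == nk for d in nds]) for nk in _dedup([nk for nk, _ in pairs])}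
  ((pvDedupB (pairs.map (fun q => q.1))).foldl
    (fun d nk => d.insert nk (pvDedupB ((pairs.filter (fun q => q.1 == nk)).flatMap (fun q => q.2))))
    PySem.Dict.empty).items

-- ===== PRECONDITION & SPEC =====
-- Pre_ excludes (a) inputs where A raises KeyError (a component key or dep missing from rename)
-- and (b) association lists with duplicate keys, which do not represent a Python dict.
def Pre_apply_graphviz_rename_to_components_py (raw_components : List (String × List String)) (rename : List (String × String)) : Prop :=
  (raw_components.map Prod.fst).Nodup ∧ (rename.map Prod.fst).Nodup ∧
  ∀ p ∈ raw_components, p.1 ∈ rename.map Prod.fst ∧ ∀ d ∈ p.2, d ∈ rename.map Prod.fst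
instance (raw_components : List (String × List String)) (rename : List (String × String)) : Decidable (Pre_apply_graphviz_rename_to_components_py raw_components rename) := by unfold Pre_apply_graphviz_rename_to_components_py; infer_instance

def pvWitness_apply_graphviz_rename_to_components_py : (List (String × List String)) × (List (String × String)) :=
  ([("a", ["b", "b", "c"]), ("c", ["a"])], [("a", "X"), ("b", "X"), ("c", "Y")])

def Spec_apply_graphviz_rename_to_components_py (raw_components : List (String × List String)) (rename : List (String × String)) (out : List (String × List String)) : Prop := out = apply_graphviz_rename_to_components_py_alt raw_components rename
instance (raw_components : List (String × List String)) (rename : List (String × String)) (out : List (String × List String)) : Decidable (Spec_apply_graphviz_rename_to_components_py raw_components rename out) := by unfold Spec_apply_graphviz_rename_to_components_py; infer_instance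

-- ===== CLAIM (what is proved, stated in full; the proofs are below) =====
def Claim_equal_apply_graphviz_rename_to_components_py : Prop := ∀ (raw_components : List (String × List String)) (rename : List (String × String)), Dom_apply_graphviz_rename_to_components_py raw_components rename → Pre_apply_graphviz_rename_to_components_py raw_components rename → Spec_apply_graphviz_rename_to_components_py raw_components rename (apply_graphviz_rename_to_components_py raw_components rename)

-- ===== LEMMAS AND PROOFS =====

-- folding Set.add starting from s is: s followed by the head-and-filter dedup of the fresh elements
theorem pvFoldlAdd (xs : List String) (s : PySem.Set String) :
    xs.foldl PySem.Set.add s = s ++ pvDedupB (xs.filter (fun x => !(PySem.Set.contains s x))) := by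
  induction xs generalizing s with
  | nil => simp [pvDedupB]
  | cons a t ih =>
      simp only [List.foldl_cons, List.filter_cons]
      by_cases h : PySem.Set.contains s a = true
      · have hadd : PySem.Set.add s a = s := by simp only [PySem.Set.add, h, if_true]
        rw [hadd, h]
        simpa using ih s
      · have hb : PySem.Set.contains s a = false := by simpa using h
        have hadd : PySem.Set.add s a = s ++ [a] := by
          simp only [PySem.Set.add]; rw [if_neg h]
        rw [hadd, hb]
        simp only [Bool.not_false, if_pos]
        rw [ih (s ++ [a]), pvDedupB]
        rw [List.filter_filter]
        have hf : List.filter (fun x => !PySem.Set.contains (s ++ [a]) x) t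
            = List.filter (fun y => !(y == a) && !(PySem.Set.contains s y)) t := by
          apply List.filter_congr
          intro x _
          by_cases hx : x = a <;> simp [PySem.Set.contains, hx]
        simp only [List.append_assoc, List.singleton_append]
        congr 2
        rw [hf]

theorem pvDedupB_eq_ofList (xs : List String) : pvDedupB xs = PySem.Set.ofList xs := by
  have h := pvFoldlAdd xs PySem.Set.empty
  simp only [PySem.Set.empty, PySem.Set.contains, List.contains_nil, Bool.not_false,
    List.filter_true, List.nil_append] at h
  rw [PySem.Set.ofList_eq_foldl, h]

-- A's seen-set dedup loop computes the same head-and-filter dedup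
theorem pvSeenLoop (v : List String) (s : PySem.Set String) (acc : List String) :
    (v.foldl
      (fun (st : PySem.Set String × List String) d =>
        if PySem.Set.contains st.1 d then st else (PySem.Set.add st.1 d, st.2 ++ [d]))
      (s, acc)).2 = acc ++ pvDedupB (v.filter (fun x => !(PySem.Set.contains s x))) := by
  induction v generalizing s acc with
  | nil => simp [pvDedupB]
  | cons a t ih =>
      simp only [List.foldl_cons, List.filter_cons]
      by_cases h : PySem.Set.contains s a = true
      · rw [if_pos h, h]
        simpa using ih s acc
      · have hb : PySem.Set.contains s a = false := by simpa using h
        have hadd : PySem.Set.add s a = s ++ [a] := by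
          simp only [PySem.Set.add]; rw [if_neg h]
        rw [if_neg h, hadd, hb]
        simp only [Bool.not_false, if_pos]
        rw [ih (s ++ [a]) (acc ++ [a]), pvDedupB]
        rw [List.filter_filter]
        have hf : List.filter (fun x => !PySem.Set.contains (s ++ [a]) x) t
            = List.filter (fun y => !(y == a) && !(PySem.Set.contains s y)) t := by
          apply List.filter_congr
          intro x _
          by_cases hx : x = a <;> simp [PySem.Set.contains, hx]
        simp only [List.append_assoc, List.singleton_append]
        rw [hf]

-- value at key c of A's merge loop: the concatenation of the renamed dep-lists of the matching pairs
theorem pvMergeGetD (l : List (String × List String)) (key : String × List String → String)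
    (val : String × List String → List String) (d : PySem.Dict String (List String)) (c : String) :
    (l.foldl (fun m p => m.modify (key p) [] (fun v => v ++ val p)) d).getD c []
      = d.getD c [] ++ (l.filter (fun p => key p == c)).flatMap val := by
  induction l generalizing d with
  | nil => simp
  | cons p t ih =>
      simp only [List.foldl_cons, List.filter_cons]
      rw [ih]
      by_cases h : key p = c
      · subst h
        rw [PySem.Dict.getD_modify_self]
        simp
      · rw [PySem.Dict.getD_modify_of_ne _ _ _ (fun hc => h hc.symm)]
        have : (key p == c) = false := by simpa using h
        rw [this]
        simp

-- both ports, rewritten to the same canonical group-by form over the distinct renamed keys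
theorem pvA_char (raw : List (String × List String)) (rename : List (String × String)) :
    apply_graphviz_rename_to_components_py raw rename
      = (PySem.Set.ofList (raw.map (fun p => pvRn rename p.1))).map
          (fun k => (k, pvDedupB ((raw.filter (fun p => pvRn rename p.1 == k)).flatMap
            (fun p => p.2.map (fun d => pvRn rename d))))) := by
  show ((raw.foldl
      (fun m p => m.modify (pvRn rename p.1) [] (fun v => v ++ p.2.map (fun d => pvRn rename d)))
      PySem.Dict.empty).items).map (fun q =>
        (q.1, (q.2.foldl
          (fun (st : PySem.Set String × List String) d =>
            if PySem.Set.contains st.1 d then st else (PySem.Set.add st.1 d, st.2 ++ [d]))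
          (PySem.Set.empty, [])).2)) = _
  have hnd : (raw.foldl
      (fun m p => m.modify (pvRn rename p.1) [] (fun v => v ++ p.2.map (fun d => pvRn rename d)))
      PySem.Dict.empty).keys.Nodup := by
    have h := PySem.Dict.nodup_keys_foldl_modify_key raw (fun p => pvRn rename p.1) []
      (fun _ p => fun v => v ++ p.2.map (fun d => pvRn rename d)) PySem.Dict.empty
      (by simp [PySem.Dict.keys_empty])
    simpa using h
  have hkeys : (raw.foldl
      (fun m p => m.modify (pvRn rename p.1) [] (fun v => v ++ p.2.map (fun d => pvRn rename d)))
      PySem.Dict.empty).keys = PySem.Set.ofList (raw.map (fun p => pvRn rename p.1)) := by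
    have h := PySem.Dict.keys_foldl_modify_key raw (fun p => pvRn rename p.1) []
      (fun _ p => fun v => v ++ p.2.map (fun d => pvRn rename d)) PySem.Dict.empty
    simp only [PySem.Dict.keys_empty] at h
    rw [PySem.Set.ofList_eq_foldl]
    exact h
  rw [PySem.Dict.items_eq_map_keys _ hnd [], hkeys, List.map_map]
  apply List.map_congr_left
  intro k _
  simp only [Function.comp]
  have hv := pvMergeGetD raw (fun p => pvRn rename p.1)
    (fun p => p.2.map (fun d => pvRn rename d)) PySem.Dict.empty k
  simp only [PySem.Dict.getD_empty, List.nil_append] at hv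
  rw [hv]
  have hs := pvSeenLoop ((raw.filter (fun p => pvRn rename p.1 == k)).flatMap
      (fun p => p.2.map (fun d => pvRn rename d))) ([] : PySem.Set String) []
  simp only [PySem.Set.contains, List.contains_nil, Bool.not_false,
    List.filter_true, List.nil_append] at hs
  exact congrArg (Prod.mk k) hs

theorem pvB_char (raw : List (String × List String)) (rename : List (String × String)) :
    apply_graphviz_rename_to_components_py_alt raw rename
      = (PySem.Set.ofList (raw.map (fun p => pvRn rename p.1))).map
          (fun k => (k, pvDedupB ((raw.filter (fun p => pvRn rename p.1 == k)).flatMap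
            (fun p => p.2.map (fun d => pvRn rename d))))) := by
  unfold apply_graphviz_rename_to_components_py_alt
  simp only [List.map_map]
  have hks : List.map ((fun (q : String × List String) => q.1) ∘
        fun p : String × List String => (pvRn rename p.1, List.map (fun d => pvRn rename d) p.2)) raw
      = List.map (fun p => pvRn rename p.1) raw := by
    simp [Function.comp]
  rw [hks]
  have h := PySem.Dict.items_foldl_insert_fresh
    (pvDedupB (raw.map (fun p => pvRn rename p.1))) (fun a => a)
    (fun nk => pvDedupB (((raw.map (fun p => (pvRn rename p.1, p.2.map (fun d => pvRn rename d)))).filter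
      (fun q => q.1 == nk)).flatMap (fun q => q.2)))
    PySem.Dict.empty
    (by intro a _; exact PySem.Dict.contains_empty a)
    (by simp only [List.map_id_fun', id]
        rw [pvDedupB_eq_ofList]
        exact PySem.Set.nodup_ofList _)
  simp only [] at h
  rw [h]
  simp only [show (PySem.Dict.empty : PySem.Dict String (List String)).items = [] from rfl,
    List.nil_append]
  rw [pvDedupB_eq_ofList]
  apply List.map_congr_left
  intro k _
  congr 1
  rw [List.filter_map, List.flatMap_map]
  congr 2

-- ===== VERDICT (by name: the statement is the Claim_ definition above) =====
theorem apply_graphviz_rename_to_components_py_spec : Claim_equal_apply_graphviz_rename_to_components_py := by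
  intro raw rename _ _
  unfold Spec_apply_graphviz_rename_to_components_py
  rw [pvA_char, pvB_char]
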